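-- pv_equiv track=rewrite | github.com/master0419/xgen_doc2chunk | xgen_doc2chunk/core/processor/csv_helper/csv_table.py | has_merged_cells
-- ===== SOURCE A (Python) =====
-- from typing import Any, Dict, List
--
-- def has_merged_cells(rows: List[List[str]]) -> bool:
--     """
--     CSV 데이터에 병합셀(빈 셀)이 존재하는지 확인합니다.
--
--     병합셀의 판단 기준:
--     - 연속된 빈 셀이 존재하는 경우
--     - 첫 번째 열에 빈 셀이 있고 이전 행에 값이 있는 경우 (세로 병합 패턴)
--
--     Args:
--         rows: 파싱된 행 데이터
--
--     Returns:
--         병합셀이 존재하면 True, 아니면 False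
--     """
--     if not rows or len(rows) < 2:
--         return False
--
--     for row_idx, row in enumerate(rows):
--         for col_idx, cell in enumerate(row):
--             cell_value = cell.strip() if cell else ""
--
--             # 빈 셀 발견
--             if not cell_value:
--                 # 첫 번째 행이 아니고 첫 번째 열의 빈 셀 -> 세로 병합 가능성
--                 if row_idx > 0 and col_idx == 0:
--                     return True
--
--                 # 이전 셀이 비어있지 않고 현재 셀이 비어있음 -> 가로 병합 가능성
--                 if col_idx > 0:
--                     prev_cell = row[col_idx - 1].strip() if col_idx - 1 < len(row) else ""
--                     if prev_cell:
--                         return True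
--
--     return False
-- ===== SOURCE B (Python) =====
-- def has_merged_cells(rows):
--     if not rows or len(rows) < 2:
--         return False
--
--     # emptiness matrix: True where the cell is empty after stripping
--     empties = [[not (c.strip() if c else "") for c in row] for row in rows]
--
--     # vertical merge pattern: an empty first cell in some non-first row
--     if any(e and e[0] for e in empties[1:]):
--         return True
--
--     # horizontal merge pattern: a row has an empty cell right after a
--     # non-empty one exactly when its emptiness vector is NOT already
--     # sorted descending (all-empty prefix, then non-empty cells)
--     return any(e != sorted(e, reverse=True) for e in empties)
-- ===== Notes on version B (the rewrite author's own statement) =====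
-- stated objective: alternative
-- what changed: Instead of A's single nested index-driven scan with early returns and a guarded row[col_idx-1] lookup, B first builds a boolean emptiness matrix, checks vertical merges on its first column, and detects horizontal merges per row by comparing the row's emptiness vector with its descending sort (a non-empty-then-empty adjacency exists iff the vector is not sorted descending).
import Mathlib
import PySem

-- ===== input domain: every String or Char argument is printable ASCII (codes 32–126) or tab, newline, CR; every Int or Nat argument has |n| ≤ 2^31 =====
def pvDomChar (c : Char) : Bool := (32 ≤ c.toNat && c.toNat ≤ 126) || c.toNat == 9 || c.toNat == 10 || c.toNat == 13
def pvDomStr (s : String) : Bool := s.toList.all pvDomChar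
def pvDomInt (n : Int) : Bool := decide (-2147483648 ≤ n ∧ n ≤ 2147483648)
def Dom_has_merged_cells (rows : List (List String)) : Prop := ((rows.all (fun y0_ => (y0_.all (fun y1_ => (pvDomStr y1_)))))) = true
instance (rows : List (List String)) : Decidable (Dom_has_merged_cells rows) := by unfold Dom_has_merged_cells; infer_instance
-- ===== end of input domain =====

-- B replaces A's single nested index-driven scan (early returns, guarded row[col_idx-1] lookup)
-- by building a boolean emptiness matrix once, checking its first column for vertical merges,
-- and detecting horizontal merges per row by comparing the row's emptiness vector with its
-- descending sort (objective: alternative).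


-- ===== PORT A =====
-- `cell.strip() if cell else ""`
def pvStripA (c : String) : String := if c ≠ "" then PySem.Str.strip c else ""

-- inner loop `for col_idx, cell in enumerate(row)`; `orig` is the full row (for row[col_idx-1],
-- whose index is guarded in range by the Python condition, so getD is exact here)
def hmcRowLoop (rowIdx : Nat) (orig : List String) : List String → Nat → Bool
  | [], _ => false
  | cell :: rest, colIdx =>
    let cv := pvStripA cell
    if cv == "" then
      if 0 < rowIdx ∧ colIdx = 0 then true
      else if 0 < colIdx then
        let prev := if colIdx - 1 < orig.length then PySem.Str.strip (orig.getD (colIdx - 1) "") else ""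
        if prev ≠ "" then true else hmcRowLoop rowIdx orig rest (colIdx + 1)
      else hmcRowLoop rowIdx orig rest (colIdx + 1)
    else hmcRowLoop rowIdx orig rest (colIdx + 1)

-- outer loop `for row_idx, row in enumerate(rows)`
def hmcRowsLoop : List (List String) → Nat → Bool
  | [], _ => false
  | row :: rest, rowIdx =>
    if hmcRowLoop rowIdx row row 0 then true else hmcRowsLoop rest (rowIdx + 1)

def has_merged_cells (rows : List (List String)) : Bool :=
  if rows.isEmpty || rows.length < 2 then false
  else hmcRowsLoop rows 0

-- ===== PORT B =====
-- `not (c.strip() if c else "")`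
def pvEmptyCell (c : String) : Bool := ((if c ≠ "" then PySem.Str.strip c else "") == "")

def has_merged_cells_alt (rows : List (List String)) : Bool :=
  if rows.isEmpty || rows.length < 2 then false
  else
    let empties := rows.map (fun row => row.map pvEmptyCell)
    if (empties.drop 1).any (fun e => !e.isEmpty && e.headD false) then true
    else empties.any (fun e => e != PySem.List.sorted e (fun x => x) true)

-- ===== PRECONDITION & SPEC =====
def Spec_has_merged_cells (rows : List (List String)) (out : Bool) : Prop := out = has_merged_cells_alt rows
instance (rows : List (List String)) (out : Bool) : Decidable (Spec_has_merged_cells rows out) := by unfold Spec_has_merged_cells; infer_instance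

-- ===== CLAIM (what is proved, stated in full; the proofs are below) =====
def Claim_equal_has_merged_cells : Prop := ∀ (rows : List (List String)), Dom_has_merged_cells rows → Spec_has_merged_cells rows (has_merged_cells rows)

-- ===== LEMMAS AND PROOFS =====

-- proof-side characterisations of one row of A's scan
def pvVert (row : List String) : Bool := !row.isEmpty && (pvStripA (row.headD "") == "")

def pvHoriz (row : List String) : Bool :=
  (row.zip (row.drop 1)).any (fun pc => (pvStripA pc.1 != "") && (pvStripA pc.2 == ""))

theorem pvStripA_eq (c : String) : pvStripA c = PySem.Str.strip c := by
  by_cases h : c = ""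
  · subst h; decide
  · simp [pvStripA, h]

theorem pvHoriz_short (l : List String) (h : l.length ≤ 1) : pvHoriz l = false := by
  match l with
  | [] => rfl
  | [a] => rfl
  | a :: b :: t => simp at h

-- the inner loop from column k ≥ 1 computes the horizontal check on the suffix from k-1
theorem hmcRowLoop_suffix (rowIdx : Nat) (orig : List String) :
    ∀ (s : List String) (k : Nat), 1 ≤ k → s = orig.drop k →
      hmcRowLoop rowIdx orig s k = pvHoriz (orig.drop (k - 1)) := by
  intro s
  induction s with
  | nil =>
    intro k hk hs
    have hlen : orig.length ≤ k := List.drop_eq_nil_iff.mp hs.symm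
    rw [hmcRowLoop, pvHoriz_short]
    have : orig.length - (k - 1) ≤ 1 := by omega
    simpa using this
  | cons cell rest ih =>
    intro k hk hs
    have hkl : k < orig.length := by
      by_contra h
      rw [List.drop_eq_nil_of_le (by omega)] at hs
      simp at hs
    have hk1 : k - 1 < orig.length := by omega
    have hdk : orig.drop k = orig[k]'hkl :: orig.drop (k + 1) := List.drop_eq_getElem_cons hkl
    have hs' : cell :: rest = orig[k]'hkl :: orig.drop (k + 1) := by rw [hs, hdk]
    injection hs' with hcell hrest
    have hdk1 : orig.drop (k - 1) = orig[k - 1]'hk1 :: cell :: rest := by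
      have h2 := List.drop_eq_getElem_cons hk1
      rw [show k - 1 + 1 = k by omega, ← hs] at h2
      exact h2
    have hgetD : orig.getD (k - 1) "" = orig[k - 1]'hk1 := by
      simp [List.getD, List.getElem?_eq_getElem hk1]
    have hexp : pvHoriz (orig.drop (k - 1)) =
        (((pvStripA (orig[k - 1]'hk1) != "") && (pvStripA cell == "")) || pvHoriz (cell :: rest)) := by
      rw [hdk1]; simp [pvHoriz]
    have hih : hmcRowLoop rowIdx orig rest (k + 1) = pvHoriz (cell :: rest) := by
      have h3 := ih (k + 1) (by omega) (by simpa using hrest)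
      rw [h3]
      rw [show k + 1 - 1 = k by omega, ← hs]
    rw [hmcRowLoop]
    by_cases hcv : pvStripA cell = ""
    · have hnot : ¬ (0 < rowIdx ∧ k = 0) := by omega
      rw [hexp]
      simp only [hcv, if_pos (by rfl : ("" == "") = true), if_neg hnot, if_pos (by omega : 0 < k),
        if_pos hk1, hgetD]
      by_cases hprev : PySem.Str.strip (orig[k - 1]'hk1) ≠ ""
      · rw [if_pos hprev]
        have h1 : (pvStripA (orig[k - 1]'hk1) != "") = true := by
          rw [pvStripA_eq]; simpa using hprev
        have h2 : (pvStripA cell == "") = true := by rw [hcv]; rfl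
        simp [h1]
      · rw [if_neg hprev, hih]
        have h1 : (pvStripA (orig[k - 1]'hk1) != "") = false := by
          rw [pvStripA_eq]; simpa using hprev
        simp [h1]
    · have hbc : (pvStripA cell == "") = false := by simpa using hcv
      rw [hexp]
      simp only [hbc]
      rw [if_neg (by simp : ¬ false = true), hih]
      simp

-- one full inner loop = (row_idx > 0 and vertical on this row) or horizontal on this row
theorem hmcRowLoop_eq (rowIdx : Nat) (row : List String) :
    hmcRowLoop rowIdx row row 0 = ((decide (0 < rowIdx) && pvVert row) || pvHoriz row) := by
  match row with
  | [] => simp [hmcRowLoop, pvVert, pvHoriz]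
  | cell :: rest =>
    have hrec : hmcRowLoop rowIdx (cell :: rest) rest 1 = pvHoriz (cell :: rest) := by
      have h1 := hmcRowLoop_suffix rowIdx (cell :: rest) rest 1 (le_refl 1) (by simp)
      simpa using h1
    rw [hmcRowLoop]
    by_cases hcv : pvStripA cell = ""
    · have hv : pvVert (cell :: rest) = true := by
        simp only [pvVert, List.headD_cons, List.isEmpty_cons]
        rw [hcv]; rfl
      by_cases hr : 0 < rowIdx
      · simp [hcv, hr, hv]
      · simp [hcv, hr, hv, hrec]
    · have hv : pvVert (cell :: rest) = false := by
        simp only [pvVert, List.headD_cons, List.isEmpty_cons]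
        simpa using hcv
      have hbc : (pvStripA cell == "") = false := by simpa using hcv
      simp [hbc, hv, hrec]

theorem hmcRowsLoop_eq (l : List (List String)) :
    ∀ (idx : Nat), 1 ≤ idx → hmcRowsLoop l idx = l.any (fun r => pvVert r || pvHoriz r) := by
  induction l with
  | nil => intro idx _; rfl
  | cons r rest ih =>
    intro idx hidx
    rw [hmcRowsLoop, hmcRowLoop_eq, ih (idx + 1) (by omega)]
    have hd : decide (0 < idx) = true := by simpa using hidx
    rw [hd, List.any_cons]
    cases hb : (pvVert r || pvHoriz r) <;> simp [hb]

theorem any_or_split (l : List (List String)) :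
    l.any (fun r => pvVert r || pvHoriz r) = (l.any pvVert || l.any pvHoriz) := by
  induction l with
  | nil => rfl
  | cons r rest ih =>
    rw [List.any_cons, List.any_cons, List.any_cons, ih]
    cases pvVert r <;> cases pvHoriz r <;>
      cases rest.any pvVert <;> cases rest.any pvHoriz <;> simp

-- B's vertical test on the emptiness vector is A's pvVert
theorem vert_bridge (row : List String) :
    (!(row.map pvEmptyCell).isEmpty && (row.map pvEmptyCell).headD false) = pvVert row := by
  match row with
  | [] => rfl
  | c :: t => simp [pvVert, pvEmptyCell, pvStripA]

-- adjacency on bools: chain-decreasing iff no (false, true) adjacent pair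
theorem chain_adj (e : List Bool) :
    ((e.zip (e.drop 1)).any (fun p => !p.1 && p.2) = false) ↔ e.IsChain (fun a b => b ≤ a) := by
  induction e with
  | nil => simp
  | cons a t ih =>
    match t with
    | [] => simp
    | b :: t' =>
      rw [List.isChain_cons_cons]
      constructor
      · intro h
        simp only [List.drop_succ_cons, List.drop_zero, List.zip_cons_cons, List.any_cons,
          Bool.or_eq_false_iff] at h
        refine ⟨?_, ih.mp ?_⟩
        · cases a <;> cases b <;> simp_all
        · simpa using h.2
      · intro ⟨hab, hc⟩
        have h2 := ih.mpr hc
        simp only [List.drop_succ_cons, List.drop_zero, List.zip_cons_cons, List.any_cons,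
          Bool.or_eq_false_iff]
        refine ⟨?_, by simpa using h2⟩
        cases a <;> cases b <;> simp_all
        exact absurd hab (by decide)

-- B's sort-and-compare test on the emptiness vector is A's pvHoriz
theorem horiz_bridge (row : List String) :
    ((row.map pvEmptyCell) != PySem.List.sorted (row.map pvEmptyCell) (fun x => x) true) = pvHoriz row := by
  set e := row.map pvEmptyCell with he
  have hadj : (e.zip (e.drop 1)).any (fun p => !p.1 && p.2) = pvHoriz row := by
    rw [he, ← List.map_drop, List.zip_map, List.any_map]
    unfold pvHoriz
    have hfun : ((fun p : Bool × Bool => !p.1 && p.2) ∘ Prod.map pvEmptyCell pvEmptyCell)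
        = (fun pc : String × String => (pvStripA pc.1 != "") && (pvStripA pc.2 == "")) := by
      funext p
      simp [pvEmptyCell, pvStripA, Function.comp, Prod.map, bne]
    rw [hfun]
  have hsorted : (e = PySem.List.sorted e (fun x => x) true) ↔ e.IsChain (fun a b => b ≤ a) := by
    constructor
    · intro h
      have hp := PySem.List.sorted_pairwise_rev (xs := e) (key := fun x => x)
      rw [← h] at hp
      exact List.isChain_iff_pairwise.mpr hp
    · intro h
      exact (PySem.List.sorted_rev_eq_self_of_pairwise (xs := e) (key := fun x => x)
        (List.isChain_iff_pairwise.mp h)).symm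
  rw [← hadj]
  cases hz : (e.zip (e.drop 1)).any (fun p => !p.1 && p.2)
  · have := hsorted.mpr ((chain_adj e).mp hz)
    simp [← this]
  · have : ¬ (e = PySem.List.sorted e (fun x => x) true) := by
      intro h
      have := (chain_adj e).mpr (hsorted.mp h)
      rw [this] at hz; exact Bool.false_ne_true hz
    simpa using this

-- ===== VERDICT (by name: the statement is the Claim_ definition above) =====
theorem has_merged_cells_spec : Claim_equal_has_merged_cells := by
  intro rows _
  unfold Spec_has_merged_cells has_merged_cells has_merged_cells_alt
  split_ifs with h
  · rfl
  · match rows, h with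
    | r :: rest, h =>
      rw [hmcRowsLoop, hmcRowLoop_eq, hmcRowsLoop_eq rest 1 (le_refl 1), any_or_split]
      simp only [List.map_cons, List.drop_succ_cons, List.drop_zero, List.any_cons,
        Nat.lt_irrefl, decide_false, Bool.false_and, Bool.false_or]
      rw [List.any_map, List.any_map]
      have hvr : ∀ x, ((!(List.map pvEmptyCell x).isEmpty && (List.map pvEmptyCell x).headD false)) = pvVert x :=
        vert_bridge
      have hhr : ∀ x, ((List.map pvEmptyCell x) != PySem.List.sorted (List.map pvEmptyCell x) (fun x => x) true) = pvHoriz x :=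
        horiz_bridge
      simp only [Function.comp_def, hvr, hhr]
      cases hb : pvHoriz r <;> cases hv : rest.any pvVert <;> cases hh : rest.any pvHoriz <;>
        simp
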